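-- pv_equiv track=rewrite | github.com/anajuradocrespo/paradigmas_programacion_python | 5_Ejercicios_Clase_PDF_2.py | cada_oveja_con_su_paraje
-- ===== SOURCE A (Python) =====
-- def cada_oveja_con_su_paraje(lista):
--
--     lista_aux = list()
--
--     for j in lista:
--         if j not in lista_aux:
--             if (-1*j) not in lista_aux:
--                 lista_aux.append(j)
--             else:
--                 lista_aux.remove((-1*j))
--         else:
--             lista_aux.append(j)
--
--     return lista_aux
-- ===== SOURCE B (Python) =====
-- def cada_oveja_con_su_paraje(lista):
--     # Two counting passes instead of simulating the cancellation: for each value v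
--     # the survivors are exactly its last max(count(v)-count(-v), 0) occurrences
--     # (all occurrences for v == 0), so a backward sweep with per-value quotas
--     # selects them and a final reverse restores the original order.
--     total = {}
--     for j in lista:
--         total[j] = total.get(j, 0) + 1
--     need = {}
--     for v in total:
--         need[v] = total[v] if v == 0 else total[v] - total.get(-v, 0)
--     out = []
--     for j in reversed(lista):
--         if need.get(j, 0) > 0:
--             out.append(j)
--             need[j] = need[j] - 1
--     out.reverse()
--     return out
-- ===== Notes on version B (the rewrite author's own statement) =====
-- stated objective: faster
-- what changed: A simulates the cancellation process, rescanning its result list for every element; B never simulates it: it counts occurrences, derives for each value v the quota count(v)-count(-v) of surviving last occurrences (all occurrences for 0), and selects exactly those in one backward sweep.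
import Mathlib
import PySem

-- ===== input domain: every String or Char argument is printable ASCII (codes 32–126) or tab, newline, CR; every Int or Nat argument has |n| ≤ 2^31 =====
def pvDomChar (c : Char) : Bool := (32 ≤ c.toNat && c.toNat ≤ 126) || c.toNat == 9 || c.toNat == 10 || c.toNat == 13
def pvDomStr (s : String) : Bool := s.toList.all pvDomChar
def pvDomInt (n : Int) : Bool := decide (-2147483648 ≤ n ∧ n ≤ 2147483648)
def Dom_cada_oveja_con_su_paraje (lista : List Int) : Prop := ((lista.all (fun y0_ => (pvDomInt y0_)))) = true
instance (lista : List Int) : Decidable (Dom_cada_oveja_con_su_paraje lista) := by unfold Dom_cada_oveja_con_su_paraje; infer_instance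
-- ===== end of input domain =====

-- B replaces A's O(n^2) simulation of the cancellation process by two counting
-- passes and a backward selection sweep (objective: faster).

-- ===== PORT A =====
-- body of A's for-loop, branches in A's order
def covStep (aux : List Int) (j : Int) : List Int :=
  if j ∉ aux then
    if (-1*j) ∉ aux then
      aux ++ [j]
    else
      -- lista_aux.remove(-1*j): remove? is some here, the branch requires (-1*j) ∈ aux
      (PySem.List.remove? aux (-1*j)).getD aux
  else
    aux ++ [j]

def covLoop : List Int → List Int → List Int
  | [], aux => aux
  | j :: rest, aux => covLoop rest (covStep aux j)

def cada_oveja_con_su_paraje (lista : List Int) : List Int :=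
  covLoop lista []

-- ===== PORT B =====
-- total[j] = total.get(j, 0) + 1, over lista
def bTotal (lista : List Int) : PySem.Dict Int Int :=
  lista.foldl (fun d j => d.insert j (d.getD j 0 + 1)) PySem.Dict.empty

-- for v in total: need[v] = total[v] if v == 0 else total[v] - total.get(-v, 0)
-- (total[v] never raises: v is a key of total, so it is total.getD v 0 exactly)
def bNeed (total : PySem.Dict Int Int) : PySem.Dict Int Int :=
  total.keys.foldl
    (fun nd v => nd.insert v (if v = 0 then total.getD v 0 else total.getD v 0 - total.getD (-v) 0))
    PySem.Dict.empty

-- for j in reversed(lista): if need.get(j, 0) > 0: out.append(j); need[j] = need[j] - 1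
def bLoop : List Int → List Int × PySem.Dict Int Int → List Int × PySem.Dict Int Int
  | [], st => st
  | j :: rest, (out, need) =>
      bLoop rest
        (if 0 < need.getD j 0 then (out ++ [j], need.insert j (need.getD j 0 - 1))
         else (out, need))

def cada_oveja_con_su_paraje_alt (lista : List Int) : List Int :=
  ((bLoop lista.reverse ([], bNeed (bTotal lista))).1).reverse

-- ===== PRECONDITION & SPEC =====
def Spec_cada_oveja_con_su_paraje (lista : List Int) (out : List Int) : Prop := out = cada_oveja_con_su_paraje_alt lista
instance (lista : List Int) (out : List Int) : Decidable (Spec_cada_oveja_con_su_paraje lista out) := by unfold Spec_cada_oveja_con_su_paraje; infer_instance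

-- ===== CLAIM (what is proved, stated in full; the proofs are below) =====
def Claim_equal_cada_oveja_con_su_paraje : Prop := ∀ (lista : List Int), Dom_cada_oveja_con_su_paraje lista → Spec_cada_oveja_con_su_paraje lista (cada_oveja_con_su_paraje lista)

-- ===== LEMMAS AND PROOFS =====

-- the per-value quota of survivors: count(v) - count(-v), but count(v) for v = 0
def needFun (l : List Int) (v : Int) : Int :=
  if v = 0 then (l.count v : Int) else (l.count v : Int) - (l.count (-v) : Int)

-- forward selection: keep an occurrence iff its suffix count is within the quota
-- (i.e. it is among the last m-of-its-value occurrences)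
def pickF : List Int → (Int → Int) → List Int
  | [], _ => []
  | j :: r, m => if ((j :: r).count j : Int) ≤ m j then j :: pickF r m else pickF r m

-- backward selection with mutable quotas, the shape of B's loop
def pickRev : List Int → (Int → Int) → List Int
  | [], _ => []
  | j :: r, m => if 0 < m j then j :: pickRev r (Function.update m j (m j - 1)) else pickRev r m

theorem covLoop_append (P : List Int) (x : Int) (aux : List Int) :
    covLoop (P ++ [x]) aux = covStep (covLoop P aux) x := by
  induction P generalizing aux with
  | nil => rfl
  | cons j r ih => exact ih (covStep aux j)

-- pickF only looks at quotas through conditions "suffix count ≤ quota"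
theorem pickF_congr (P : List Int) (m m' : Int → Int)
    (h : ∀ (v : Int) (c : Nat), 1 ≤ c → c ≤ P.count v → ((c : Int) ≤ m v ↔ (c : Int) ≤ m' v)) :
    pickF P m = pickF P m' := by
  induction P with
  | nil => rfl
  | cons j r ih =>
    have hr : ∀ (v : Int) (c : Nat), 1 ≤ c → c ≤ r.count v → ((c : Int) ≤ m v ↔ (c : Int) ≤ m' v) := by
      intro v c h1 h2
      exact h v c h1 (h2.trans (List.count_le_count_cons ..))
    have hj := h j ((j :: r).count j) (by have : (j :: r).count j = r.count j + 1 := List.count_cons_self; omega) le_rfl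
    simp only [pickF]
    by_cases hc : (((j :: r).count j : Nat) : Int) ≤ m j
    · rw [if_pos hc, if_pos (hj.mp hc), ih hr]
    · rw [if_neg hc, if_neg (fun hx => hc (hj.mpr hx)), ih hr]

theorem pickF_append (P : List Int) (x : Int) (m : Int → Int) :
    pickF (P ++ [x]) m
      = pickF P (Function.update m x (m x - 1)) ++ (if 1 ≤ m x then [x] else []) := by
  induction P with
  | nil =>
    have h1 : ((([x] : List Int).count x : Nat) : Int) = 1 := by simp
    show pickF [x] m = pickF [] _ ++ _
    simp only [pickF, h1]
    by_cases h : 1 ≤ m x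
    · rw [if_pos h]; rfl
    · rw [if_neg h]; rfl
  | cons j r ih =>
    simp only [List.cons_append, pickF, ih]
    by_cases hjx : j = x
    · subst hjx
      have hcnt : (j :: (r ++ [j])).count j = (j :: r).count j + 1 := by
        simp [List.count_append]
      have hupd : Function.update m j (m j - 1) j = m j - 1 := Function.update_self ..
      by_cases hc : ((j :: (r ++ [j])).count j : Int) ≤ m j
      · rw [if_pos hc, if_pos (show ((j :: r).count j : Int) ≤ Function.update m j (m j - 1) j by rw [hupd]; omega)]
        simp
      · rw [if_neg hc, if_neg (show ¬ ((j :: r).count j : Int) ≤ Function.update m j (m j - 1) j by rw [hupd]; omega)]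
    · have hcnt : (j :: (r ++ [x])).count j = (j :: r).count j := by
        simp [List.count_append, Ne.symm hjx]
      have hupd : Function.update m x (m x - 1) j = m j := by
        rw [Function.update_apply]
        exact if_neg hjx
      by_cases hc : ((j :: (r ++ [x])).count j : Int) ≤ m j
      · rw [if_pos hc, if_pos (show ((j :: r).count j : Int) ≤ Function.update m x (m x - 1) j by rw [hupd]; omega)]
        simp
      · rw [if_neg hc, if_neg (show ¬ ((j :: r).count j : Int) ≤ Function.update m x (m x - 1) j by rw [hupd]; omega)]

theorem mem_pickF (P : List Int) (m : Int → Int) (v : Int) :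
    v ∈ pickF P m ↔ 1 ≤ m v ∧ v ∈ P := by
  induction P with
  | nil => simp [pickF]
  | cons j r ih =>
    simp only [pickF]
    by_cases hc : ((j :: r).count j : Int) ≤ m j
    · rw [if_pos hc]
      constructor
      · intro hv
        rcases List.mem_cons.mp hv with h | h
        · subst h
          refine ⟨le_trans ?_ hc, List.mem_cons_self ..⟩
          have h1 : (v :: r).count v = r.count v + 1 := List.count_cons_self
          omega
        · obtain ⟨h1, h2⟩ := ih.mp h
          exact ⟨h1, List.mem_cons_of_mem _ h2⟩
      · intro ⟨h1, h2⟩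
        rcases List.mem_cons.mp h2 with h | h
        · exact h ▸ List.mem_cons_self ..
        · exact List.mem_cons_of_mem _ (ih.mpr ⟨h1, h⟩)
    · rw [if_neg hc, ih]
      constructor
      · intro ⟨h1, h2⟩
        exact ⟨h1, List.mem_cons_of_mem _ h2⟩
      · intro ⟨h1, h2⟩
        refine ⟨h1, ?_⟩
        rcases List.mem_cons.mp h2 with h | h
        · subst h
          -- the head is dropped: its count exceeds m v ≥ 1, so v occurs again in r
          have hcc := (List.count_cons_self : (v :: r).count v = r.count v + 1)
          exact List.count_pos_iff.mp (by omega)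
        · exact h

-- decrementing one value's quota erases the earliest kept occurrence of that value
theorem erase_pickF (P : List Int) (m : Int → Int) (v : Int)
    (h1 : 1 ≤ m v) (h2 : m v ≤ (P.count v : Int)) :
    pickF P (Function.update m v (m v - 1)) = (pickF P m).erase v := by
  induction P generalizing m with
  | nil =>
    exfalso
    simp only [List.count_nil, Nat.cast_zero] at h2
    omega
  | cons j r ih =>
    simp only [pickF]
    by_cases hj : j = v
    · subst hj
      have hne : ¬ (((j :: r).count j : Int) ≤ Function.update m j (m j - 1) j) := by
        rw [Function.update_self]
        omega
      rw [if_neg hne]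
      by_cases hk : ((j :: r).count j : Int) ≤ m j
      · -- the head is the earliest kept occurrence: it is dropped, the rest is unchanged
        have hcnt : ((j :: r).count j : Int) = m j := le_antisymm hk h2
        rw [if_pos hk, List.erase_cons_head]
        refine pickF_congr r _ m ?_
        intro w c hc1 hc2
        by_cases hw : w = j
        · subst hw
          rw [Function.update_self]
          have hrc := (List.count_cons_self : (w :: r).count w = r.count w + 1)
          constructor <;> intro h' <;> omega
        · rw [Function.update_apply, if_neg hw]
      · -- the head is dropped by both quotas; recurse
        have hcc : (j :: r).count j = r.count j + 1 := List.count_cons_self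
        rw [if_neg hk, ih m h1 (by omega)]
    · have hvj : v ≠ j := fun h => hj h.symm
      have hupd : Function.update m v (m v - 1) j = m j := by
        rw [Function.update_apply]
        exact if_neg (Ne.symm hvj)
      have hcnt : (j :: r).count v = r.count v := by
        simp [hj]
      by_cases hc : ((j :: r).count j : Int) ≤ m j
      · rw [if_pos (show ((j :: r).count j : Int) ≤ Function.update m v (m v - 1) j by rw [hupd]; omega),
          if_pos hc, ih m h1 (by omega), List.erase_cons_tail (by simp [hj])]
      · rw [if_neg (show ¬ ((j :: r).count j : Int) ≤ Function.update m v (m v - 1) j by rw [hupd]; omega),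
          if_neg hc, ih m h1 (by omega)]

theorem pickRev_congr (R : List Int) (m m' : Int → Int)
    (h : ∀ j ∈ R, m j = m' j) : pickRev R m = pickRev R m' := by
  induction R generalizing m m' with
  | nil => rfl
  | cons j r ih =>
    have hj := h j (List.mem_cons_self ..)
    simp only [pickRev, hj]
    by_cases hc : 0 < m' j
    · rw [if_pos hc, if_pos hc, ih _ _ ?_]
      intro i hi
      by_cases hij : i = j
      · subst hij
        rw [Function.update_self, Function.update_self]
      · rw [Function.update_apply, if_neg hij, Function.update_apply, if_neg hij]
        exact h i (List.mem_cons_of_mem _ hi)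
    · rw [if_neg hc, if_neg hc, ih _ _ (fun i hi => h i (List.mem_cons_of_mem _ hi))]

theorem pickRev_append (R : List Int) (x : Int) (m : Int → Int) :
    pickRev (R ++ [x]) m
      = pickRev R m ++ (if (R.count x : Int) + 1 ≤ m x then [x] else []) := by
  induction R generalizing m with
  | nil =>
    show pickRev [x] m = pickRev [] m ++ _
    simp only [pickRev, List.count_nil, Nat.cast_zero, zero_add]
    by_cases h : 1 ≤ m x
    · rw [if_pos (by omega), if_pos h]; rfl
    · rw [if_neg (by omega), if_neg h]; rfl
  | cons a r ih =>
    simp only [List.cons_append, pickRev, ih]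
    by_cases hc : 0 < m a
    · rw [if_pos hc, if_pos hc]
      have hiff : ((r.count x : Int) + 1 ≤ Function.update m a (m a - 1) x)
          ↔ (((a :: r).count x : Int) + 1 ≤ m x) := by
        by_cases hax : x = a
        · subst hax
          rw [Function.update_self]
          have hcc := (List.count_cons_self : (x :: r).count x = r.count x + 1)
          constructor <;> intro <;> omega
        · rw [Function.update_apply, if_neg hax]
          have hcnt : (a :: r).count x = r.count x := by
            simp [Ne.symm hax]
          constructor <;> intro <;> omega
      by_cases ht : ((a :: r).count x : Int) + 1 ≤ m x
      · rw [if_pos (hiff.mpr ht), if_pos ht]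
        simp
      · rw [if_neg (fun hx => ht (hiff.mp hx)), if_neg ht]
        simp
    · rw [if_neg hc, if_neg hc]
      have hiff : ((r.count x : Int) + 1 ≤ m x) ↔ (((a :: r).count x : Int) + 1 ≤ m x) := by
        by_cases hax : x = a
        · subst hax
          have hcc := (List.count_cons_self : (x :: r).count x = r.count x + 1)
          constructor <;> intro <;> omega
        · have hcnt : (a :: r).count x = r.count x := by
            simp [Ne.symm hax]
          rw [hcnt]
      by_cases ht : ((a :: r).count x : Int) + 1 ≤ m x
      · rw [if_pos (hiff.mpr ht), if_pos ht]
      · rw [if_neg (fun hx => ht (hiff.mp hx)), if_neg ht]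

theorem pickRev_reverse (l : List Int) (m : Int → Int) :
    pickRev l.reverse m = (pickF l m).reverse := by
  induction l with
  | nil => rfl
  | cons j r ih =>
    rw [List.reverse_cons, pickRev_append, ih]
    simp only [pickF]
    have hcnt : ((r.reverse.count j : Int)) + 1 = ((j :: r).count j : Int) := by
      have h1 := List.count_reverse (l := r) (a := j)
      have h2 := (List.count_cons_self : (j :: r).count j = r.count j + 1)
      omega
    rw [hcnt]
    by_cases hc : ((j :: r).count j : Int) ≤ m j
    · rw [if_pos hc, if_pos hc, List.reverse_cons]
    · rw [if_neg hc, if_neg hc, List.append_nil]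

theorem bLoop_spec (R : List Int) (out : List Int) (need : PySem.Dict Int Int) :
    (bLoop R (out, need)).1 = out ++ pickRev R (fun v => need.getD v 0) := by
  induction R generalizing out need with
  | nil => simp [bLoop, pickRev]
  | cons j r ih =>
    simp only [bLoop, pickRev]
    by_cases hc : 0 < need.getD j 0
    · rw [if_pos hc, if_pos hc, ih]
      have hfn : (fun v => (need.insert j (need.getD j 0 - 1)).getD v 0)
          = Function.update (fun v => need.getD v 0) j (need.getD j 0 - 1) := by
        funext v
        rw [PySem.Dict.getD_insert, Function.update_apply]
      rw [hfn, List.append_assoc]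
      rfl
    · rw [if_neg hc, if_neg hc, ih]

-- the need dict built by B reads back the inserted value on keys of total, 0 elsewhere
theorem foldl_insert_const_getD (ks : List Int) (f : Int → Int) (d : PySem.Dict Int Int) (w : Int) :
    (ks.foldl (fun nd v => nd.insert v (f v)) d).getD w 0
      = if w ∈ ks then f w else d.getD w 0 := by
  induction ks generalizing d with
  | nil => simp
  | cons k ks ih =>
    simp only [List.foldl_cons, ih, PySem.Dict.getD_insert]
    by_cases hw : w ∈ ks
    · simp [hw]
    · by_cases hwk : w = k
      · simp [hwk]
      · simp [hw, hwk]

theorem bNeed_getD (lista : List Int) (j : Int) (hj : j ∈ lista) :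
    (bNeed (bTotal lista)).getD j 0 = needFun lista j := by
  have ht : bTotal lista = PySem.Dict.counter lista :=
    PySem.Dict.foldl_insert_getD_add_one_eq_counter lista
  have hk : j ∈ (bTotal lista).keys := by
    rw [ht, PySem.Dict.keys_counter]
    exact (PySem.Set.mem_ofList ..).mpr hj
  unfold bNeed
  rw [foldl_insert_const_getD _ _ _ j, if_pos hk, ht]
  unfold needFun
  by_cases h0 : j = 0
  · rw [if_pos h0, if_pos h0, PySem.Dict.getD_counter]
  · rw [if_neg h0, if_neg h0, PySem.Dict.getD_counter, PySem.Dict.getD_counter]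

-- the heart of the equivalence: A's simulation keeps exactly the last
-- needFun-many occurrences of each value
theorem covLoop_eq_pickF (P : List Int) :
    covLoop P [] = pickF P (needFun P) := by
  induction P using List.reverseRecOn with
  | nil => rfl
  | append_singleton P x ih =>
    rw [covLoop_append, ih, pickF_append]
    set n := needFun P with hn
    set N := needFun (P ++ [x]) with hN
    have hcxN : ∀ v : Int, (P ++ [x]).count v = P.count v + if v = x then 1 else 0 := by
      intro v
      by_cases h : v = x
      · subst h; simp [List.count_append]
      · simp [List.count_append, h, Ne.symm h]
    by_cases hx0 : x = 0
    · subst hx0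
      have hN0 : N 0 = n 0 + 1 := by
        have h := hcxN 0
        rw [if_pos rfl] at h
        simp only [hN, hn, needFun, if_true]
        omega
      have hupd : Function.update N 0 (N 0 - 1) = n := by
        funext v
        rw [Function.update_apply]
        by_cases hv : v = 0
        · subst hv; rw [if_pos rfl, hN0]; ring
        · rw [if_neg hv]
          have h1 := hcxN v
          rw [if_neg hv] at h1
          have h2 := hcxN (-v)
          rw [if_neg (show ¬ -v = 0 by omega)] at h2
          simp only [hN, hn, needFun, if_neg hv]
          omega
      have hpos : 1 ≤ N 0 := by
        have : (0:Int) ≤ n 0 := by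
          simp only [hn, needFun, if_true]; positivity
        omega
      rw [hupd, if_pos hpos]
      -- covStep appends 0 in both of its branches
      show covStep (pickF P n) 0 = pickF P n ++ [0]
      unfold covStep
      by_cases hmem : (0:Int) ∈ pickF P n
      · rw [if_neg (not_not_intro hmem)]
      · rw [if_pos hmem, if_pos (by simpa using hmem)]
    · -- x ≠ 0: the updated quota map is n with the quota of -x decremented
      have hNx : N x = n x + 1 := by
        have h1 := hcxN x
        rw [if_pos rfl] at h1
        have h2 := hcxN (-x)
        rw [if_neg (show ¬ -x = x by omega)] at h2
        simp only [hN, hn, needFun, if_neg hx0]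
        omega
      have hupd : Function.update N x (N x - 1) = Function.update n (-x) (n (-x) - 1) := by
        funext v
        by_cases hv : v = x
        · subst hv
          rw [Function.update_self, Function.update_apply,
            if_neg (show ¬ v = -v by omega), hNx]
          ring
        · by_cases hvnx : v = -x
          · subst hvnx
            rw [Function.update_apply, if_neg hv, Function.update_self]
            have h1 := hcxN (-x)
            rw [if_neg (show ¬ -x = x by omega)] at h1
            have h2 := hcxN x
            rw [if_pos rfl] at h2
            simp only [hN, hn, needFun, if_neg (show ¬ -x = 0 by omega), neg_neg]
            omega
          · rw [Function.update_apply, if_neg hv, Function.update_apply, if_neg hvnx]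
            have h1 := hcxN v
            rw [if_neg hv] at h1
            have h2 := hcxN (-v)
            rw [if_neg (show ¬ -v = x by omega)] at h2
            by_cases hv0 : v = 0
            · subst hv0
              simp only [hN, hn, needFun, if_true]
              omega
            · simp only [hN, hn, needFun, if_neg hv0]
              omega
      rw [hupd]
      have hmemx : x ∈ pickF P n ↔ 1 ≤ n x := by
        rw [mem_pickF]
        constructor
        · exact fun h => h.1
        · intro h
          refine ⟨h, List.count_pos_iff.mp ?_⟩
          simp only [hn, needFun, if_neg hx0] at h
          omega
      have hmemnx : -x ∈ pickF P n ↔ 1 ≤ n (-x) := by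
        rw [mem_pickF]
        constructor
        · exact fun h => h.1
        · intro h
          refine ⟨h, List.count_pos_iff.mp ?_⟩
          simp only [hn, needFun, if_neg (show ¬ -x = 0 by omega), neg_neg] at h
          omega
      have hnnx : n (-x) = -(n x) := by
        simp only [hn, needFun, if_neg hx0, if_neg (show ¬ -x = 0 by omega), neg_neg]
        ring
      by_cases hcase : 1 ≤ n (-x)
      · -- removal: x absent, -x present; quota decrement = erase of the first -x
        have hxnot : x ∉ pickF P n := fun h => by
          have := hmemx.mp h
          omega
        have hnxmem : -x ∈ pickF P n := hmemnx.mpr hcase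
        rw [if_neg (show ¬ 1 ≤ N x by omega), List.append_nil,
          erase_pickF P n (-x) hcase ?_]
        · show covStep (pickF P n) x = (pickF P n).erase (-x)
          unfold covStep
          rw [if_pos hxnot, if_neg (not_not_intro (by rwa [neg_one_mul])),
            PySem.List.remove?_eq_some_erase _ (-1*x) (by rwa [neg_one_mul]),
            Option.getD_some, neg_one_mul]
        · simp only [hn, needFun, if_neg (show ¬ -x = 0 by omega), neg_neg]
          have : (0:Int) ≤ (P.count x : Int) := by positivity
          omega
      · -- append: the -x quota is ≤ 0 before and after, so nothing changes but the tail [x]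
        have hagree : pickF P (Function.update n (-x) (n (-x) - 1)) = pickF P n := by
          refine pickF_congr P _ n ?_
          intro w c hc1 hc2
          by_cases hw : w = -x
          · subst hw
            rw [Function.update_self]
            constructor <;> intro h' <;> (exfalso; omega)
          · rw [Function.update_apply, if_neg hw]
        rw [hagree, if_pos (by omega)]
        show covStep (pickF P n) x = pickF P n ++ [x]
        unfold covStep
        by_cases hxm : x ∈ pickF P n
        · rw [if_neg (not_not_intro hxm)]
        · have hnxnot : -x ∉ pickF P n := fun h => by
            have := hmemnx.mp h
            omega
          rw [if_pos hxm, if_pos (by rwa [neg_one_mul])]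

-- ===== VERDICT (by name: the statement is the Claim_ definition above) =====
theorem cada_oveja_con_su_paraje_spec : Claim_equal_cada_oveja_con_su_paraje := by
  intro lista _
  unfold Spec_cada_oveja_con_su_paraje cada_oveja_con_su_paraje cada_oveja_con_su_paraje_alt
  rw [bLoop_spec, List.nil_append,
    pickRev_congr lista.reverse _ (needFun lista)
      (fun j hj => bNeed_getD lista j (List.mem_reverse.mp hj)),
    pickRev_reverse, List.reverse_reverse, covLoop_eq_pickF]
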